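-- pv_equiv track=rewrite | github.com/OnionSm/CS419_Information_Retrieval | backend/controllers/query_controller.py | filter_related_docs_dynamic
-- ===== SOURCE A (Python) =====
-- def filter_related_docs_dynamic(related_docs_map, top_n):
--     threshold = 5
--     while threshold >= 1:
--         filtered_docs = {
--             doc_id for doc_id, count in related_docs_map.items()
--             if count >= threshold
--         }
--         if len(filtered_docs) >= top_n:
--             return filtered_docs
--         threshold -= 1
--     # Nếu không đủ, trả về tất cả documents
--     return set(related_docs_map.keys())
-- ===== SOURCE B (Python) =====
-- def filter_related_docs_dynamic(related_docs_map, top_n):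
--     # One tally pass: counts[t] = number of docs with value >= t, for t = 1..5.
--     counts = [0] * 6
--     for v in related_docs_map.values():
--         for t in range(1, 6):
--             if v >= t:
--                 counts[t] += 1
--     # Pick the highest threshold that yields at least top_n docs; build that set once.
--     for t in (5, 4, 3, 2, 1):
--         if counts[t] >= top_n:
--             return {doc_id for doc_id, c in related_docs_map.items() if c >= t}
--     return set(related_docs_map.keys())
-- ===== Notes on version B (the rewrite author's own statement) =====
-- stated objective: alternative
-- what changed: Instead of rebuilding a filtered set for each threshold 5..1 until one is large enough, B tallies in one pass how many docs meet each threshold, picks the highest qualifying threshold from the tally table, and builds the single returned set once.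
import Mathlib
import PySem

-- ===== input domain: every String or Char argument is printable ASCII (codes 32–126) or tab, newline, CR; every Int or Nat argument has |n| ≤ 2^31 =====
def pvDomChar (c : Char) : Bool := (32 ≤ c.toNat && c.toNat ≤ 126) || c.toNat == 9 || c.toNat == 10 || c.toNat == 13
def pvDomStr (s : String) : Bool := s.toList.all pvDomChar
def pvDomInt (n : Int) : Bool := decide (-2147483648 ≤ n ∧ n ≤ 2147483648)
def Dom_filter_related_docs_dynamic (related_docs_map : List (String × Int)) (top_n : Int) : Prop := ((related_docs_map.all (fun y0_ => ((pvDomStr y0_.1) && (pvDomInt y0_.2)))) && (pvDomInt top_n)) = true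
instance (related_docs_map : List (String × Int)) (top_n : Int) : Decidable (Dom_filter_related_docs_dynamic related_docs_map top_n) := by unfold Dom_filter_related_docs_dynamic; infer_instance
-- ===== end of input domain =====

-- B replaces A's rebuild-a-set-per-threshold loop by one tally pass plus a single set build (alternative decomposition, same asymptotic cost).


-- ===== PORT A =====
-- A's while loop over threshold = 5,4,3,2,1; fuel = threshold.
def pvLoopA (items : List (String × Int)) (top_n : Int) : Nat → List String
  | 0 => items.map (·.1)          -- return set(related_docs_map.keys())
  | (t + 1) =>
    let filtered : List String := (items.filter (fun p => decide (p.2 ≥ ((t : Int) + 1)))).map (·.1)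
    if (filtered.length : Int) ≥ top_n then filtered else pvLoopA items top_n t

def filter_related_docs_dynamic (related_docs_map : List (String × Int)) (top_n : Int) : List String :=
  pvLoopA (PySem.Dict.ofList related_docs_map).items top_n 5

-- ===== PORT B =====
-- one tally pass: component t of the 5-tuple = #docs with value ≥ t
def pvTally (items : List (String × Int)) : Int × Int × Int × Int × Int :=
  items.foldl (fun c p =>
    (c.1 + (if p.2 ≥ 1 then 1 else 0),
     c.2.1 + (if p.2 ≥ 2 then 1 else 0),
     c.2.2.1 + (if p.2 ≥ 3 then 1 else 0),
     c.2.2.2.1 + (if p.2 ≥ 4 then 1 else 0),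
     c.2.2.2.2 + (if p.2 ≥ 5 then 1 else 0))) (0, 0, 0, 0, 0)

def pvPick (items : List (String × Int)) (t : Int) : List String :=
  (items.filter (fun p => decide (p.2 ≥ t))).map (·.1)

def filter_related_docs_dynamic_alt (related_docs_map : List (String × Int)) (top_n : Int) : List String :=
  let items := (PySem.Dict.ofList related_docs_map).items
  let c := pvTally items
  if c.2.2.2.2 ≥ top_n then pvPick items 5
  else if c.2.2.2.1 ≥ top_n then pvPick items 4
  else if c.2.2.1 ≥ top_n then pvPick items 3
  else if c.2.1 ≥ top_n then pvPick items 2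
  else if c.1 ≥ top_n then pvPick items 1
  else items.map (·.1)

-- ===== PRECONDITION & SPEC =====
def Spec_filter_related_docs_dynamic (related_docs_map : List (String × Int)) (top_n : Int) (out : List String) : Prop := out = filter_related_docs_dynamic_alt related_docs_map top_n
instance (related_docs_map : List (String × Int)) (top_n : Int) (out : List String) : Decidable (Spec_filter_related_docs_dynamic related_docs_map top_n out) := by unfold Spec_filter_related_docs_dynamic; infer_instance

-- ===== CLAIM (what is proved, stated in full; the proofs are below) =====
def Claim_equal_filter_related_docs_dynamic : Prop := ∀ (related_docs_map : List (String × Int)) (top_n : Int), Dom_filter_related_docs_dynamic related_docs_map top_n → Spec_filter_related_docs_dynamic related_docs_map top_n (filter_related_docs_dynamic related_docs_map top_n)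

-- ===== LEMMAS AND PROOFS =====
def pvCnt (items : List (String × Int)) (t : Int) : Int :=
  ((items.filter (fun p => decide (p.2 ≥ t))).length : Int)

theorem pvCnt_cons (p : String × Int) (rest : List (String × Int)) (t : Int) :
    pvCnt (p :: rest) t = (if p.2 ≥ t then 1 else 0) + pvCnt rest t := by
  by_cases h : p.2 ≥ t <;> simp [pvCnt, h] <;> omega

theorem pvTally_go (items : List (String × Int)) (c : Int × Int × Int × Int × Int) :
    items.foldl (fun c p =>
      (c.1 + (if p.2 ≥ 1 then 1 else 0),
       c.2.1 + (if p.2 ≥ 2 then 1 else 0),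
       c.2.2.1 + (if p.2 ≥ 3 then 1 else 0),
       c.2.2.2.1 + (if p.2 ≥ 4 then 1 else 0),
       c.2.2.2.2 + (if p.2 ≥ 5 then 1 else 0))) c
    = (c.1 + pvCnt items 1, c.2.1 + pvCnt items 2, c.2.2.1 + pvCnt items 3,
       c.2.2.2.1 + pvCnt items 4, c.2.2.2.2 + pvCnt items 5) := by
  induction items generalizing c with
  | nil => simp [pvCnt]
  | cons p rest ih =>
    simp only [List.foldl_cons, ih, pvCnt_cons, Prod.mk.injEq]
    refine ⟨by ring, by ring, by ring, by ring, by ring⟩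

theorem pvTally_spec (items : List (String × Int)) :
    pvTally items = (pvCnt items 1, pvCnt items 2, pvCnt items 3, pvCnt items 4, pvCnt items 5) := by
  simp [pvTally, pvTally_go]

theorem pvLoopA_pick (items : List (String × Int)) (top_n : Int) (t : Nat) :
    pvLoopA items top_n (t + 1)
      = if pvCnt items ((t : Int) + 1) ≥ top_n then pvPick items ((t : Int) + 1)
        else pvLoopA items top_n t := by
  simp [pvLoopA, pvPick, pvCnt]

-- ===== VERDICT (by name: the statement is the Claim_ definition above) =====

theorem filter_related_docs_dynamic_spec : Claim_equal_filter_related_docs_dynamic := by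
  intro m top_n _
  unfold Spec_filter_related_docs_dynamic filter_related_docs_dynamic filter_related_docs_dynamic_alt
  dsimp only
  set items := (PySem.Dict.ofList m).items with hitems
  rw [pvTally_spec]
  rw [show (5 : Nat) = 4 + 1 from rfl, pvLoopA_pick,
      show (4 : Nat) = 3 + 1 from rfl, pvLoopA_pick,
      show (3 : Nat) = 2 + 1 from rfl, pvLoopA_pick,
      show (2 : Nat) = 1 + 1 from rfl, pvLoopA_pick,
      show (1 : Nat) = 0 + 1 from rfl, pvLoopA_pick]
  norm_num [pvLoopA]
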